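-- pv_equiv track=rewrite | github.com/Alicia6N/fi-parliament-tools | src/fi_parliament_tools/speaker_extraction.py | rename_duplicated_speakers
-- ===== SOURCE A (Python) =====
-- from collections import defaultdict
--
-- def rename_duplicated_speakers(speakers):
--     # There are some frames in which the speakers are duplicated, meaning that there are the same ids in the same frame.
--     ids = [data['speaker_id'] for data in speakers]
--     duplicated_names = defaultdict(list)
--     for i, item in enumerate(ids):
--         duplicated_names[item].append(i)
--     for _, locs in duplicated_names.items():
--         for i in range(1, len(locs)):
--             speakers[locs[i]]['speaker_id'] = speakers[locs[i]]['speaker_id']+'d'+str(i)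
--     ids = [data['speaker_id'] for data in speakers]
--     return speakers
-- ===== SOURCE B (Python) =====
-- def rename_duplicated_speakers(speakers):
--     # Single pass: count occurrences of each original id as we go; rename
--     # every occurrence after the first with 'd' + its occurrence number.
--     seen = {}
--     for data in speakers:
--         orig = data['speaker_id']
--         cnt = seen.get(orig, 0)
--         if cnt:
--             data['speaker_id'] = orig + 'd' + str(cnt)
--         seen[orig] = cnt + 1
--     return speakers
-- ===== Notes on version B (the rewrite author's own statement) =====
-- stated objective: simpler
-- what changed: Replaced the two-phase group-then-patch scheme (build a defaultdict of index lists per id, then loop over the groups renaming positions 1.. of each) by a single forward pass that keeps a running count per original id and renames each later occurrence in place as it is met, dropping the dead trailing ids recomputation.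
import Mathlib
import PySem

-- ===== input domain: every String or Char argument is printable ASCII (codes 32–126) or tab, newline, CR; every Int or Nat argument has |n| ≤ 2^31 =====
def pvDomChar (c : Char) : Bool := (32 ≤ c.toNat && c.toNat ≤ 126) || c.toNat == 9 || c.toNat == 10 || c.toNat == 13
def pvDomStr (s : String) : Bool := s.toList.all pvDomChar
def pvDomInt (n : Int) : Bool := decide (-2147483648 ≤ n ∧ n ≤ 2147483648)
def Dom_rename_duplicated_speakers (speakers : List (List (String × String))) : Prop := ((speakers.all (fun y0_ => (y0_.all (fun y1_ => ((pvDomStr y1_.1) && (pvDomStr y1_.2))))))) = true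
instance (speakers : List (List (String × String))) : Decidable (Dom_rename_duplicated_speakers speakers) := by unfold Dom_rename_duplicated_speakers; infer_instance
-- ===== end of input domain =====

-- B replaces A's group-then-patch scheme by one forward pass with a running count per id;
-- both Pythons mutate the dicts in `speakers` in place — the equivalence proved here is about the return value.

-- the assignment statement `data['speaker_id'] = data['speaker_id'] + 'd' + str(k)`, shared by both ports
def pvRename (d : List (String × String)) (k : Int) : List (String × String) :=
  ((PySem.Dict.mk d).insert "speaker_id" ((PySem.Dict.mk d).getD "speaker_id" "" ++ "d" ++ PySem.Int.toStr k)).items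

-- ===== PORT A =====
def rename_duplicated_speakers (speakers : List (List (String × String))) : List (List (String × String)) :=
  let ids := speakers.map (fun data => (PySem.Dict.mk data).getD "speaker_id" "")
  let duplicated_names := (PySem.List.enumerate ids 0).foldl
    (fun dd p => dd.modify p.2 [] (fun l => l ++ [p.1])) PySem.Dict.empty
  -- for _, locs in duplicated_names.items(): for i in range(1, len(locs)): speakers[locs[i]]['speaker_id'] = …
  duplicated_names.items.foldl (fun sp pr =>
    (PySem.List.pyRange 1 (pr.2.length : Int) 1).foldl (fun sp i =>
      match PySem.List.pyGet? pr.2 i with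
      | some pos =>
        match PySem.List.pyGet? sp pos with
        | some d => sp.set pos.toNat (pvRename d i)
        | none => sp
      | none => sp) sp) speakers
  -- the trailing `ids = [...]` of A is dead code and has no effect on the result

-- ===== PORT B =====
def renameGo (seen : PySem.Dict String Int) : List (List (String × String)) → List (List (String × String))
  | [] => []
  | data :: rest =>
    let orig := (PySem.Dict.mk data).getD "speaker_id" ""
    let cnt := seen.getD orig 0
    (if cnt = 0 then data else pvRename data cnt) :: renameGo (seen.insert orig (cnt + 1)) rest

def rename_duplicated_speakers_alt (speakers : List (List (String × String))) : List (List (String × String)) :=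
  renameGo PySem.Dict.empty speakers

-- ===== PRECONDITION & SPEC =====
-- Pre_ excludes exactly the inputs where some element has no 'speaker_id' key, on which Python A raises KeyError.
def Pre_rename_duplicated_speakers (speakers : List (List (String × String))) : Prop :=
  (speakers.all (fun data => (PySem.Dict.mk data).contains "speaker_id")) = true
instance (speakers : List (List (String × String))) : Decidable (Pre_rename_duplicated_speakers speakers) := by unfold Pre_rename_duplicated_speakers; infer_instance

def pvWitness_rename_duplicated_speakers : (List (List (String × String))) :=
  [[("speaker_id", "a"), ("name", "x")], [("speaker_id", "a")], [("speaker_id", "b")], [("speaker_id", "a")]]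

def Spec_rename_duplicated_speakers (speakers : List (List (String × String))) (out : List (List (String × String))) : Prop := out = rename_duplicated_speakers_alt speakers
instance (speakers : List (List (String × String))) (out : List (List (String × String))) : Decidable (Spec_rename_duplicated_speakers speakers out) := by unfold Spec_rename_duplicated_speakers; infer_instance

-- ===== CLAIM (what is proved, stated in full; the proofs are below) =====
def Claim_equal_rename_duplicated_speakers : Prop := ∀ (speakers : List (List (String × String))), Dom_rename_duplicated_speakers speakers → Pre_rename_duplicated_speakers speakers → Spec_rename_duplicated_speakers speakers (rename_duplicated_speakers speakers)

-- ===== LEMMAS AND PROOFS =====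

-- abbreviations for the proofs
def idOf (d : List (String × String)) : String := (PySem.Dict.mk d).getD "speaker_id" ""

def rn (d : List (String × String)) (c : Nat) : List (String × String) :=
  if (c : Int) = 0 then d else pvRename d (c : Int)

-- the common target: element i gets suffix 'd'+k where k = number of earlier elements with the same original id
def targetAux (p : List String) : List (List (String × String)) → List (List (String × String))
  | [] => []
  | d :: rest => rn d (p.count (idOf d)) :: targetAux (p ++ [idOf d]) rest

-- ---------- B = target ----------
lemma renameGo_eq_targetAux (l : List (List (String × String))) (p : List String)
    (seen : PySem.Dict String Int) (h : ∀ x, seen.getD x 0 = (p.count x : Int)) :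
    renameGo seen l = targetAux p l := by
  induction l generalizing p seen with
  | nil => rfl
  | cons d rest ih =>
    simp only [renameGo, targetAux, rn, idOf]
    rw [h]
    refine congrArg₂ _ rfl (ih _ _ ?_)
    intro x
    rw [PySem.Dict.getD_insert]
    by_cases hx : x = (PySem.Dict.mk d).getD "speaker_id" ""
    · simp [hx, h, List.count_append]
    · simp [hx, h, List.count_append, Ne.symm hx]

lemma alt_eq_target (speakers : List (List (String × String))) :
    rename_duplicated_speakers_alt speakers = targetAux [] speakers := by
  apply renameGo_eq_targetAux
  intro x; simp [PySem.Dict.getD_empty]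

lemma length_targetAux (p : List String) (l : List (List (String × String))) :
    (targetAux p l).length = l.length := by
  induction l generalizing p with
  | nil => rfl
  | cons d rest ih => simp [targetAux, ih]

lemma targetAux_getElem? (l : List (List (String × String))) (p : List String) (i : Nat) :
    (targetAux p l)[i]? = (l[i]?).map (fun d => rn d ((p ++ (l.take i).map idOf).count (idOf d))) := by
  induction l generalizing p i with
  | nil => simp [targetAux]
  | cons d rest ih =>
    cases i with
    | zero => simp [targetAux]
    | succ i => simp [targetAux, ih, List.append_assoc]

-- ---------- occurrence lists ----------
def occN (ids : List String) (x : String) : List Nat :=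
  (List.range ids.length).filter (fun i => ids[i]? = some x)

lemma occN_append_singleton (l : List String) (a x : String) :
    occN (l ++ [a]) x = occN l x ++ (if a = x then [l.length] else []) := by
  unfold occN
  rw [show (l ++ [a]).length = l.length + 1 by simp, List.range_succ, List.filter_append]
  congr 1
  · apply List.filter_congr
    intro i hi
    simp only [List.mem_range] at hi
    simp [List.getElem?_append_left hi]
  · simp only [List.filter_cons, List.filter_nil]
    by_cases h : a = x <;> simp [h]

lemma length_occN (ids : List String) (x : String) :
    (occN ids x).length = ids.count x := by
  induction ids using List.reverseRecOn with
  | nil => rfl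
  | append_singleton l a ih =>
    rw [occN_append_singleton]
    by_cases h : a = x <;> simp [h, ih, List.count_append]

lemma occN_char (ids : List String) (x : String) (j p : Nat) :
    (occN ids x)[j]? = some p ↔ p < ids.length ∧ ids[p]? = some x ∧ (ids.take p).count x = j := by
  induction ids using List.reverseRecOn generalizing j p with
  | nil => simp [occN]
  | append_singleton l a ih =>
    rw [occN_append_singleton]
    by_cases hlt : j < (occN l x).length
    · rw [List.getElem?_append_left hlt, ih]
      constructor
      · rintro ⟨h1, h2, h3⟩
        exact ⟨by simp; omega, by rw [List.getElem?_append_left h1]; exact h2,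
          by rw [List.take_append_of_le_length (by omega)]; exact h3⟩
      · rintro ⟨h1, h2, h3⟩
        by_cases hp : p < l.length
        · exact ⟨hp, by rwa [List.getElem?_append_left hp] at h2,
            by rwa [List.take_append_of_le_length (by omega)] at h3⟩
        · exfalso
          have hpl : p = l.length := by simp at h1; omega
          subst hpl
          rw [List.getElem?_append_right (le_refl _)] at h2
          simp at h2
          rw [List.take_append_of_le_length (le_refl _), List.take_length] at h3
          rw [length_occN] at hlt
          omega
    · rw [List.getElem?_append_right (by omega)]
      by_cases hax : a = x
      · subst hax
        rw [if_pos rfl]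
        constructor
        · intro h
          obtain ⟨hjl, hpe⟩ := List.getElem?_eq_some_iff.mp h
          simp at hjl
          have hj : j = (occN l a).length := by omega
          rw [List.getElem_singleton] at hpe
          subst hpe
          refine ⟨by simp, by rw [List.getElem?_append_right (le_refl _)]; simp, ?_⟩
          rw [List.take_append_of_le_length (le_refl _), List.take_length, hj, length_occN]
        · rintro ⟨h1, h2, h3⟩
          by_cases hp : p < l.length
          · exfalso
            rw [List.getElem?_append_left hp] at h2
            rw [List.take_append_of_le_length (by omega)] at h3
            have htk : l.take (p+1) = l.take p ++ [a] := by
              rw [List.take_add_one, h2]; rfl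
            have hle : (l.take (p+1)).count a ≤ l.count a :=
              (List.take_sublist _ l).count_le a
            rw [htk] at hle
            simp [List.count_append] at hle
            rw [length_occN] at hlt
            omega
          · have hpl : p = l.length := by simp at h1; omega
            subst hpl
            rw [List.take_append_of_le_length (le_refl _), List.take_length] at h3
            have : j = (occN l a).length := by rw [length_occN]; omega
            subst this
            simp
      · simp only [if_neg hax, List.append_nil]
        rw [List.getElem?_eq_none (by simp)]
        constructor
        · intro h; exact absurd h (by simp)
        · rintro ⟨h1, h2, h3⟩
          by_cases hp : p < l.length
          · rw [List.getElem?_append_left hp] at h2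
            rw [List.take_append_of_le_length (by omega)] at h3
            exfalso
            have := (ih ((l.take p).count x) p).2 ⟨hp, h2, rfl⟩
            rw [h3] at this
            have : j < (occN l x).length := by
              have := List.getElem?_eq_some_iff.mp this
              exact this.1
            omega
          · exfalso
            have hpl : p = l.length := by simp at h1; omega
            subst hpl
            rw [List.getElem?_append_right (le_refl _)] at h2
            simp at h2
            exact hax h2

-- the Int-valued occurrence list the A port's dict actually stores
def occI (ids : List String) (x : String) : List Int :=
  ((PySem.List.enumerate ids 0).filter (fun p => p.2 == x)).map (fun p => p.1)

lemma occI_eq_map_occN (ids : List String) (x : String) :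
    occI ids x = (occN ids x).map (fun (n : Nat) => (n : Int)) := by
  induction ids using List.reverseRecOn with
  | nil => rfl
  | append_singleton l a ih =>
    unfold occI at ih ⊢
    rw [PySem.List.enumerate_append, List.filter_append, List.map_append, ih,
      occN_append_singleton]
    by_cases h : a = x <;> simp [PySem.List.enumerate, h]

-- ---------- phase 1 of A: the grouping dict ----------
def dnOf (ids : List String) : PySem.Dict String (List Int) :=
  (PySem.List.enumerate ids 0).foldl (fun dd p => dd.modify p.2 [] (fun l => l ++ [p.1])) PySem.Dict.empty

lemma dnOf_getD (ids : List String) (x : String) : (dnOf ids).getD x [] = occI ids x := by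
  unfold dnOf
  have hsw : (PySem.List.enumerate ids 0).foldl
      (fun (dd : PySem.Dict String (List Int)) p => dd.modify p.2 [] (fun l => l ++ [p.1])) PySem.Dict.empty
      = ((PySem.List.enumerate ids 0).map Prod.swap).foldl
      (fun (dd : PySem.Dict String (List Int)) q => dd.modify q.1 [] (fun l => l ++ [q.2])) PySem.Dict.empty := by
    rw [List.foldl_map]; rfl
  rw [hsw, PySem.Dict.getD_foldl_modify_append]
  unfold occI
  rw [List.filter_map]
  simp [Function.comp_def, PySem.Dict.getD_empty]

lemma dnOf_keys (ids : List String) : (dnOf ids).keys = PySem.Set.ofList ids := by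
  unfold dnOf
  rw [PySem.Dict.keys_foldl_modify_key (l := PySem.List.enumerate ids 0)
    (key := fun p => p.2) (d0 := []) (f := fun dd p => (fun l => l ++ [p.1]))
    (d := PySem.Dict.empty), PySem.List.map_snd_enumerate]
  simp [PySem.Dict.keys_empty, PySem.Set.update_nil_left]

lemma dnOf_items (ids : List String) :
    (dnOf ids).items = (PySem.Set.ofList ids).map (fun x => (x, occI ids x)) := by
  have hnd : (dnOf ids).keys.Nodup := by
    rw [dnOf_keys]; exact PySem.Set.nodup_ofList ids
  rw [PySem.Dict.items_eq_map_keys _ hnd [], dnOf_keys]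
  apply List.map_congr_left
  intro x _
  rw [dnOf_getD]

-- ---------- phase 2 of A: the scattered updates ----------
def applyUpd (sp : List (List (String × String))) (q : Nat × Int) : List (List (String × String)) :=
  match sp[q.1]? with
  | some d => sp.set q.1 (pvRename d q.2)
  | none => sp

lemma fold_applyUpd (U : List (Nat × Int)) (orig target : List (List (String × String))) :
    ∀ sp : List (List (String × String)),
    (∀ i, sp[i]? = if i ∈ U.map (fun q => q.1) then orig[i]? else target[i]?) →
    (U.map (fun q => q.1)).Nodup →
    (∀ q ∈ U, ∃ d, orig[q.1]? = some d ∧ target[q.1]? = some (pvRename d q.2)) →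
    U.foldl applyUpd sp = target := by
  induction U with
  | nil =>
    intro sp hsp _ _
    simp only [List.foldl_nil]
    apply List.ext_getElem?
    intro i
    have := hsp i
    simpa using this
  | cons q U ih =>
    intro sp hsp hnd hval
    obtain ⟨d, hd, ht⟩ := hval q (by simp)
    have hspq : sp[q.1]? = some d := by
      rw [hsp q.1]; simp [hd]
    simp only [List.foldl_cons]
    have hq1 : q.1 ∉ U.map (fun q => q.1) := by
      simp only [List.map_cons, List.nodup_cons] at hnd
      exact hnd.1
    apply ih
    · intro i
      unfold applyUpd
      rw [hspq]
      rw [List.getElem?_set]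
      by_cases hi : i = q.1
      · subst hi
        have hlt : q.1 < sp.length := (List.getElem?_eq_some_iff.mp hspq).1
        simp [hlt, if_neg hq1, ← ht]
      · rw [if_neg (show ¬ q.1 = i from fun h => hi h.symm)]
        rw [hsp i]
        have hmem : (i ∈ (q :: U).map (fun q => q.1)) ↔ (i ∈ U.map (fun q => q.1)) := by
          simp [hi]
        simp only [hmem]
    · simp only [List.map_cons, List.nodup_cons] at hnd
      exact hnd.2
    · intro q' hq'
      exact hval q' (by simp [hq'])

-- the flat list of updates A performs, per id
def gpairs (ids : List String) (x : String) : List (Nat × Int) :=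
  (PySem.List.pyRange 1 ((occN ids x).length : Int) 1).map
    (fun i => ((occN ids x).getD i.toNat 0, i))

lemma foldl_foldl_eq_flat {α β γ : Type} (l : List α) (g : α → List β)
    (f : γ → β → γ) (init : γ) :
    l.foldl (fun acc a => (g a).foldl f acc) init = (l.flatMap g).foldl f init := by
  induction l generalizing init with
  | nil => rfl
  | cons a l ih => simp [List.flatMap_cons, List.foldl_append, ih]

lemma mem_gpairs (ids : List String) (x : String) (q : Nat × Int) (h : q ∈ gpairs ids x) :
    1 ≤ q.2 ∧ q.2 < ((occN ids x).length : Int) ∧ (occN ids x)[q.2.toNat]? = some q.1 := by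
  unfold gpairs at h
  simp only [List.mem_map] at h
  obtain ⟨i, hi, rfl⟩ := h
  rw [PySem.List.mem_pyRange_one] at hi
  have h2 : i.toNat < (occN ids x).length := by omega
  refine ⟨hi.1, hi.2, ?_⟩
  simp [List.getElem?_eq_getElem h2, List.getD_eq_getElem?_getD, List.getElem?_eq_getElem h2]

lemma gpairs_getD_eq (ids : List String) (x : String) (i : Int)
    (h1 : 1 ≤ i) (h2 : i < ((occN ids x).length : Int)) :
    (occN ids x)[i.toNat]? = some ((occN ids x).getD i.toNat 0) := by
  have hlt : i.toNat < (occN ids x).length := by omega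
  simp [List.getElem?_eq_getElem hlt, List.getD_eq_getElem?_getD, List.getElem?_eq_getElem hlt]

lemma gpairs_pos_nodup (ids : List String) (x : String) :
    ((gpairs ids x).map (fun q => q.1)).Nodup := by
  unfold gpairs
  rw [List.map_map]
  apply List.Nodup.map_on ?_ (PySem.List.nodup_pyRange_one 1 _)
  intro i hi j hj heq
  rw [PySem.List.mem_pyRange_one] at hi hj
  simp only [Function.comp] at heq
  have hic := (occN_char ids x i.toNat _).mp (gpairs_getD_eq ids x i hi.1 hi.2)
  have hjc := (occN_char ids x j.toNat _).mp (gpairs_getD_eq ids x j hj.1 hj.2)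
  rw [heq] at hic
  omega

lemma pos_mem_gpairs (ids : List String) (x : String) (p : Nat)
    (h : p ∈ (gpairs ids x).map (fun q => q.1)) : ids[p]? = some x := by
  simp only [List.mem_map] at h
  obtain ⟨q, hq, rfl⟩ := h
  obtain ⟨h1, h2, h3⟩ := mem_gpairs ids x q hq
  exact ((occN_char ids x q.2.toNat q.1).mp h3).2.1

-- A unfolded to the flat fold shape
lemma A_eq_fold (speakers : List (List (String × String))) :
    rename_duplicated_speakers speakers =
    (dnOf (speakers.map idOf)).items.foldl (fun sp pr =>
      (PySem.List.pyRange 1 (pr.2.length : Int) 1).foldl (fun sp i =>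
        match PySem.List.pyGet? pr.2 i with
        | some pos =>
          match PySem.List.pyGet? sp pos with
          | some d => sp.set pos.toNat (pvRename d i)
          | none => sp
        | none => sp) sp) speakers := rfl

lemma A_eq_target (speakers : List (List (String × String))) :
    rename_duplicated_speakers speakers = targetAux [] speakers := by
  rw [A_eq_fold]
  set ids := speakers.map idOf with hids
  rw [dnOf_items, List.foldl_map]
  have hstep : ∀ x ∈ PySem.Set.ofList ids, ∀ sp : List (List (String × String)),
      (PySem.List.pyRange 1 (((occI ids x).length : Nat) : Int) 1).foldl (fun sp i =>
        match PySem.List.pyGet? (occI ids x) i with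
        | some pos =>
          match PySem.List.pyGet? sp pos with
          | some d => sp.set pos.toNat (pvRename d i)
          | none => sp
        | none => sp) sp = (gpairs ids x).foldl applyUpd sp := by
    intro x _ sp
    unfold gpairs
    rw [List.foldl_map]
    have hlen : (occI ids x).length = (occN ids x).length := by
      rw [occI_eq_map_occN, List.length_map]
    rw [hlen]
    apply PySem.List.foldl_congr_mem'
    intro i hi sp'
    rw [PySem.List.mem_pyRange_one] at hi
    have hocc := gpairs_getD_eq ids x i hi.1 hi.2
    have hi' : ((i.toNat : Nat) : Int) = i := by omega
    have hget : PySem.List.pyGet? (occI ids x) i = some (((occN ids x).getD i.toNat 0 : Nat) : Int) := by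
      rw [← hi', PySem.List.pyGet?_natCast, occI_eq_map_occN, List.getElem?_map, hocc]
      rfl
    rw [hget]
    simp only [PySem.List.pyGet?_natCast, Int.toNat_natCast]
    unfold applyUpd
    cases sp'[(occN ids x).getD i.toNat 0]? <;> rfl
  refine Eq.trans (PySem.List.foldl_congr_mem' _ _ _ _
    (fun x hx => hstep x hx)) ?_
  rw [foldl_foldl_eq_flat _ (gpairs ids) applyUpd speakers]
  -- now apply the scattered-update lemma
  apply fold_applyUpd _ speakers (targetAux [] speakers)
  · -- initial list agrees with target off the update positions
    intro i
    by_cases hmem : i ∈ ((PySem.Set.ofList ids).flatMap (gpairs ids)).map (fun q => q.1)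
    · rw [if_pos hmem]
    · rw [if_neg hmem]
      by_cases hlt : i < speakers.length
      · have hd : speakers[i]? = some (speakers[i]'hlt) := List.getElem?_eq_some_iff.mpr ⟨hlt, rfl⟩
        rw [targetAux_getElem?, hd]
        have hc : ((speakers.take i).map idOf).count (idOf speakers[i]) = (ids.take i).count (idOf speakers[i]) := by
          rw [hids, List.map_take]
        set c := (ids.take i).count (idOf speakers[i]) with hcdef
        rw [List.nil_append]
        simp only [Option.map_some]
        rw [hc]
        by_cases hc0 : c = 0
        · simp [rn, hc0, hd]
        · exfalso
          apply hmem
          set x := idOf speakers[i] with hx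
          have hidi : ids[i]? = some x := by
            rw [hids, List.getElem?_map, hd]; rfl
          have hchar : (occN ids x)[c]? = some i := by
            rw [occN_char]
            exact ⟨by rw [hids, List.length_map]; exact hlt, hidi, hcdef.symm⟩
          have hclt : c < (occN ids x).length := (List.getElem?_eq_some_iff.mp hchar).1
          simp only [List.mem_map, List.mem_flatMap]
          refine ⟨(i, (c : Int)), ⟨x, ?_, ?_⟩, rfl⟩
          · rw [PySem.Set.mem_ofList]
            exact List.mem_of_getElem? hidi
          · unfold gpairs
            simp only [List.mem_map]
            refine ⟨(c : Int), ?_, ?_⟩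
            · rw [PySem.List.mem_pyRange_one]
              constructor <;> [omega; exact_mod_cast hclt]
            · rw [Int.toNat_natCast]
              have := gpairs_getD_eq ids x (c : Int) (by omega) (by exact_mod_cast hclt)
              rw [Int.toNat_natCast] at this
              rw [hchar] at this
              simp only [Option.some.injEq] at this
              rw [← this]
      · rw [List.getElem?_eq_none (by omega), List.getElem?_eq_none (by rw [length_targetAux]; omega)]
  · -- the update positions are pairwise distinct
    rw [List.map_flatMap]
    rw [List.nodup_flatMap]
    refine ⟨fun x _ => gpairs_pos_nodup ids x, ?_⟩
    apply List.Pairwise.imp ?_ (PySem.Set.nodup_ofList ids)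
    intro x y hxy
    intro p hpx hpy
    have h1 := pos_mem_gpairs ids x p hpx
    have h2 := pos_mem_gpairs ids y p hpy
    rw [h1] at h2
    exact hxy (Option.some.inj h2)
  · -- each update writes exactly the target value
    intro q hq
    simp only [List.mem_flatMap] at hq
    obtain ⟨x, _, hqx⟩ := hq
    obtain ⟨hq1, hq2, hq3⟩ := mem_gpairs ids x q hqx
    obtain ⟨hplt, hpid, hcount⟩ := (occN_char ids x q.2.toNat q.1).mp hq3
    have hlt : q.1 < speakers.length := by
      rw [hids, List.length_map] at hplt; exact hplt
    have hd : speakers[q.1]? = some (speakers[q.1]'hlt) := List.getElem?_eq_some_iff.mpr ⟨hlt, rfl⟩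
    refine ⟨speakers[q.1]'hlt, hd, ?_⟩
    have hix : idOf (speakers[q.1]'hlt) = x := by
      rw [hids, List.getElem?_map, hd] at hpid
      exact Option.some.inj hpid
    rw [targetAux_getElem?, hd]
    simp only [Option.map_some, Option.some.injEq, List.nil_append]
    have hcc : ((speakers.take q.1).map idOf).count (idOf (speakers[q.1]'hlt)) = q.2.toNat := by
      rw [hix, ← hcount, hids, List.map_take]
    rw [hcc]
    unfold rn
    rw [if_neg (by omega)]
    congr 1
    omega

-- ===== VERDICT (by name: the statement is the Claim_ definition above) =====
theorem rename_duplicated_speakers_spec : Claim_equal_rename_duplicated_speakers := by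
  intro speakers _ _
  unfold Spec_rename_duplicated_speakers
  rw [alt_eq_target, A_eq_target]
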